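-- pv_equiv track=rewrite | github.com/HBinhCT/Q-project | hackerearth/Algorithms/String Algorithms/Basics of String Manipulation/Unique substrings/solution.py | solve
-- ===== SOURCE A (Python) =====
-- def solve(S, K):
--     # Write your code here
--     final_string = list(S)
--     for i in range(len(final_string)):
--         substring = final_string[i:i + K]
--         for j in range(1, len(substring)):
--             if substring[j] == substring[0]:
--                 substring[j] = '#'
--         final_string[i:i + K] = substring
--     return final_string.count('#')
-- ===== SOURCE B (Python) =====
-- def solve(S, K):
--     # One left-to-right pass: a character flips to '#' iff an unflipped earlier
--     # occurrence of the same character lies within the last K-1 positions.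
--     count = 0
--     last = {}  # char -> index of its most recent unflipped occurrence
--     for p, c in enumerate(S):
--         if c == '#':
--             count += 1
--         elif c in last and p < last[c] + K:
--             count += 1
--         else:
--             last[c] = p
--     return count
-- ===== Notes on version B (the rewrite author's own statement) =====
-- stated objective: faster
-- what changed: Replaces A's per-position slice-copy/rewrite/write-back passes (each scanning a K-wide window) by a single left-to-right pass keeping a dict from character to the index of its most recent unflipped occurrence.
-- outside the precondition, e.g. on solve('abab', -1): A returns 1, B returns 0
import Mathlib
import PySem

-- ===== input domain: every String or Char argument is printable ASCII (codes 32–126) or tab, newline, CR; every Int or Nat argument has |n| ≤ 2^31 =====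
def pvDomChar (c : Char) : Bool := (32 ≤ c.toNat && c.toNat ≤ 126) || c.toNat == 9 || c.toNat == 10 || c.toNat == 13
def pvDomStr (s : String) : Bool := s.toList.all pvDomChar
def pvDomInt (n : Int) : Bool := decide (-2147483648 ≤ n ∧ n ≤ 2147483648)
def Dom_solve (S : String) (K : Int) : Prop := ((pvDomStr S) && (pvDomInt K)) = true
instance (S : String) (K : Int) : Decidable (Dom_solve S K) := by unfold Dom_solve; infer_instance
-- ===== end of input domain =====

-- B replaces A's O(n·K) window-rewriting passes by one left-to-right pass with a
-- dict of each character's most recent unflipped position (objective: faster).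

-- ===== PORT A =====
-- Python step-1 slice assignment `L[a:b] = r` (hand-ported: PySem has slice reads only).
-- Exact for step-1 assignment: both bounds resolved like a slice read (clampIdx), the stop
-- clamped to at least the start, and the addressed segment replaced by r.
def pySetSlice (L : List Char) (a b : Int) (r : List Char) : List Char :=
  L.take (PySem.List.clampIdx L.length a) ++ r ++
    L.drop (max (PySem.List.clampIdx L.length b) (PySem.List.clampIdx L.length a))

-- body of `for j in range(1, len(substring)): if substring[j] == substring[0]: substring[j] = '#'`
-- (indices from range(1, len) are always in range, so the defaults of pyGetD/pySetD are never used)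
def innerStep (s : List Char) (j : Int) : List Char :=
  if PySem.List.pyGetD s j ' ' == PySem.List.pyGetD s 0 ' ' then PySem.List.pySetD s j '#' else s

def solveInner (sub : List Char) : List Char :=
  (PySem.List.pyRange 1 (sub.length : Int) 1).foldl innerStep sub

-- one iteration of `for i in range(len(final_string))`
def solveStep (K : Int) (L : List Char) (i : Int) : List Char :=
  pySetSlice L i (i + K) (solveInner (PySem.List.slice L (some i) (some (i + K))))

def solve (S : String) (K : Int) : Int :=
  (PySem.List.count ((PySem.List.pyRange 0 (S.toList.length : Int) 1).foldl (solveStep K) S.toList) '#' : Int)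

-- ===== PORT B =====
-- state: (count so far, dict: char -> index of its most recent unflipped occurrence)
def solveAltStep (K : Int) (st : Int × PySem.Dict Char Int) (pc : Int × Char) :
    Int × PySem.Dict Char Int :=
  if pc.2 == '#' then (st.1 + 1, st.2)
  else
    match st.2.get? pc.2 with
    | some q => if pc.1 < q + K then (st.1 + 1, st.2) else (st.1, st.2.insert pc.2 pc.1)
    | none => (st.1, st.2.insert pc.2 pc.1)

def solve_alt (S : String) (K : Int) : Int :=
  ((PySem.List.enumerate S.toList).foldl (solveAltStep K) (0, PySem.Dict.empty)).1

-- ===== PRECONDITION & SPEC =====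
-- Pre_ excludes negative K (a negative window size, outside the task's natural domain),
-- where Python's negative slice stop makes A's window wrap to an end-relative position.
def Pre_solve (S : String) (K : Int) : Prop := 0 ≤ K
instance (S : String) (K : Int) : Decidable (Pre_solve S K) := by unfold Pre_solve; infer_instance
def pvWitness_solve : String × Int := ("ab#ab", 3)

def Spec_solve (S : String) (K : Int) (out : Int) : Prop := out = solve_alt S K
instance (S : String) (K : Int) (out : Int) : Decidable (Spec_solve S K out) := by unfold Spec_solve; infer_instance

-- ===== CLAIM (what is proved, stated in full; the proofs are below) =====
def Claim_equal_solve : Prop := ∀ (S : String) (K : Int), Dom_solve S K → Pre_solve S K → Spec_solve S K (solve S K)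

-- ===== LEMMAS AND PROOFS =====

-- `holds l K p` decides whether position p of the final string is '#': p ends as '#' iff it
-- started as '#' or some unflipped earlier position j with the same character has p < j + K.
-- Computed bottom-up via the list of values for positions 0..p-1.
def hstep (l : List Char) (K : Int) (hs : List Bool) (p : Nat) : Bool :=
  (l.getD p ' ' == '#') ||
    ((List.range p).any fun j =>
      decide ((p : Int) < (j : Int) + K) && !(hs.getD j true) && (l.getD j ' ' == l.getD p ' '))

def holdsList (l : List Char) (K : Int) : Nat → List Bool
  | 0 => []
  | p + 1 => holdsList l K p ++ [hstep l K (holdsList l K p) p]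

def holds (l : List Char) (K : Int) (p : Nat) : Bool := (holdsList l K (p + 1)).getD p false

lemma length_holdsList (l : List Char) (K : Int) (p : Nat) : (holdsList l K p).length = p := by
  induction p with
  | zero => rfl
  | succ q ih => simp [holdsList, ih]

lemma holds_eq (l : List Char) (K : Int) (p : Nat) :
    holds l K p = hstep l K (holdsList l K p) p := by
  rw [holds, holdsList, List.getD_eq_getElem?_getD,
    List.getElem?_append_right (by rw [length_holdsList])]
  simp [length_holdsList]

lemma holdsList_getD (l : List Char) (K : Int) (p j : Nat) (d : Bool) (h : j < p) :
    (holdsList l K p).getD j d = holds l K j := by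
  induction p with
  | zero => omega
  | succ q ih =>
    rcases Nat.lt_or_ge j q with hj | hj
    · rw [holdsList, List.getD_eq_getElem?_getD,
        List.getElem?_append_left (by rw [length_holdsList]; omega),
        ← List.getD_eq_getElem?_getD, ih hj]
    · have hjq : j = q := by omega
      subst hjq
      rw [holdsList, List.getD_eq_getElem?_getD,
        List.getElem?_append_right (by rw [length_holdsList]), holds_eq]
      simp [length_holdsList]

lemma holds_iff (l : List Char) (K : Int) (p : Nat) :
    holds l K p = true ↔ (l.getD p ' ' = '#') ∨
      ∃ j, j < p ∧ ((p : Int) < (j : Int) + K) ∧ holds l K j = false ∧ l.getD j ' ' = l.getD p ' ' := by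
  rw [holds_eq, hstep, Bool.or_eq_true, List.any_eq_true]
  constructor
  · rintro (h1 | ⟨j, hj, h2⟩)
    · exact Or.inl (by simpa using h1)
    · have hjp : j < p := List.mem_range.mp hj
      rw [holdsList_getD l K p j true hjp] at h2
      simp only [Bool.and_eq_true, decide_eq_true_eq, Bool.not_eq_true', beq_iff_eq] at h2
      exact Or.inr ⟨j, hjp, h2.1.1, h2.1.2, h2.2⟩
  · rintro (h1 | ⟨j, hjp, hK', hhj, hcj⟩)
    · exact Or.inl (by simpa using h1)
    · refine Or.inr ⟨j, List.mem_range.mpr hjp, ?_⟩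
      rw [holdsList_getD l K p j true hjp]
      simp only [Bool.and_eq_true, decide_eq_true_eq, Bool.not_eq_true', beq_iff_eq]
      exact ⟨⟨hK', hhj⟩, hcj⟩

lemma holds_false_first (l : List Char) (K : Int) (p : Nat) (h : holds l K p = false) :
    (l.getD p ' ' == '#') = false := by
  cases hb : (l.getD p ' ' == '#') with
  | false => rfl
  | true => rw [holds_eq, hstep, hb] at h; simp at h

-- state of A's array after the first i outer iterations
def reachedB (l : List Char) (K : Int) (i p : Nat) : Bool :=
  (l.getD p ' ' == '#') ||
    ((List.range i).any fun j =>
      decide (j < p) && decide ((p : Int) < (j : Int) + K) && !holds l K j &&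
        (l.getD j ' ' == l.getD p ' '))

def Lstate (l : List Char) (K : Int) (i : Nat) : List Char :=
  (List.range l.length).map fun p => if reachedB l K i p then '#' else l.getD p ' '

lemma reachedB_succ (l : List Char) (K : Int) (i p : Nat) :
    reachedB l K (i + 1) p = (reachedB l K i p ||
      (decide (i < p) && decide ((p : Int) < (i : Int) + K) && !holds l K i &&
        (l.getD i ' ' == l.getD p ' '))) := by
  simp [reachedB, List.range_succ, List.any_append, Bool.or_assoc]

lemma reachedB_self (l : List Char) (K : Int) (p : Nat) :
    reachedB l K p p = holds l K p := by
  rw [holds_eq, reachedB, hstep]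
  congr 1
  apply PySem.List.any_congr_mem
  intro j hj
  have hjp : j < p := List.mem_range.mp hj
  rw [holdsList_getD l K p j true hjp]
  simp [hjp]

lemma reachedB_of_le (l : List Char) (K : Int) {i p : Nat} (h : p ≤ i) :
    reachedB l K i p = holds l K p := by
  induction i with
  | zero =>
    have hp : p = 0 := by omega
    subst hp; exact reachedB_self l K 0
  | succ i ih =>
    rcases Nat.lt_or_ge p (i + 1) with h1 | h2
    · have hpi : p ≤ i := by omega
      rw [reachedB_succ, ih hpi]
      have hip : ¬ i < p := by omega
      simp [hip]
    · have hp : p = i + 1 := by omega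
      subst hp; exact reachedB_self l K (i + 1)

lemma reachedB_false_first (l : List Char) (K : Int) (i p : Nat) (h : reachedB l K i p = false) :
    (l.getD p ' ' == '#') = false := by
  cases hb : (l.getD p ' ' == '#') with
  | false => rfl
  | true => rw [reachedB, hb] at h; simp at h

lemma length_Lstate (l : List Char) (K : Int) (i : Nat) : (Lstate l K i).length = l.length := by
  simp [Lstate]

lemma Lstate_zero (l : List Char) (K : Int) : Lstate l K 0 = l := by
  apply List.ext_getElem (by simp [Lstate])
  intro p h1 h2
  simp only [Lstate, List.getElem_map, List.getElem_range]
  rw [reachedB]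
  simp only [List.range_zero, List.any_nil, Bool.or_false]
  rw [List.getD_eq_getElem l ' ' h2]
  by_cases hc : l[p] = '#'
  · simp [hc]
  · simp [hc]

lemma solveInner_nil : solveInner [] = [] := rfl

lemma inner_aux (c : Char) (d t : List Char) :
    (PySem.List.pyRange ((c :: d).length : Int) (((c :: d).length : Int) + t.length) 1).foldl
        innerStep ((c :: d) ++ t)
      = (c :: d) ++ t.map (fun x => if x == c then '#' else x) := by
  induction t generalizing d with
  | nil =>
    rw [show (((c :: d).length : Int) + (List.length ([] : List Char) : Int)) = ((c :: d).length : Int) by simp]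
    rw [PySem.List.pyRange_one_eq_nil le_rfl]
    simp
  | cons x t' ih =>
    have h1 : ((c :: d).length : Int) < ((c :: d).length : Int) + ((x :: t').length : Int) := by
      simp
    rw [PySem.List.pyRange_one_cons h1, List.foldl_cons]
    have hstep1 : innerStep ((c :: d) ++ x :: t') ((c :: d).length : Int)
        = (c :: d) ++ (if x == c then '#' else x) :: t' := by
      unfold innerStep
      have hg1 : PySem.List.pyGetD ((c :: d) ++ x :: t') ((c :: d).length : Int) ' ' = x := by
        rw [PySem.List.pyGetD_natCast, List.getD_eq_getElem?_getD,
          List.getElem?_append_right le_rfl]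
        simp
      have hg0 : PySem.List.pyGetD ((c :: d) ++ x :: t') 0 ' ' = c := by
        rw [List.cons_append]
        exact PySem.List.pyGetD_zero_cons _ _ _
      have hs : PySem.List.pySetD ((c :: d) ++ x :: t') ((c :: d).length : Int) '#'
          = (c :: d) ++ '#' :: t' := by
        rw [PySem.List.pySetD_natCast, List.set_append_right _ _ le_rfl]
        simp
      rw [hg1, hg0, hs]
      by_cases hxc : x = c
      · simp [hxc]
      · simp [hxc]
    rw [hstep1]
    have hre : (c :: d) ++ (if x == c then '#' else x) :: t'
        = (c :: (d ++ [if x == c then '#' else x])) ++ t' := by simp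
    rw [hre]
    have harith1 : ((c :: d).length : Int) + 1
        = ((c :: (d ++ [if x == c then '#' else x])).length : Int) := by
      simp
    have harith2 : ((c :: d).length : Int) + ((x :: t').length : Int)
        = ((c :: (d ++ [if x == c then '#' else x])).length : Int) + (t'.length : Int) := by
      simp; omega
    rw [harith1, harith2, ih (d ++ [if x == c then '#' else x])]
    simp

lemma solveInner_cons (c : Char) (t : List Char) :
    solveInner (c :: t) = c :: t.map (fun x => if x == c then '#' else x) := by
  unfold solveInner
  have h1 : ((c :: t).length : Int) = ((c :: ([] : List Char)).length : Int) + (t.length : Int) := by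
    simp; omega
  rw [h1]
  simpa using inner_aux c [] t

lemma stepA_eq (l : List Char) (K : Int) (hK : 0 ≤ K) (i : Nat) (hi : i < l.length) :
    solveStep K (Lstate l K i) ((i : Nat) : Int) = Lstate l K (i + 1) := by
  have hlen : (Lstate l K i).length = l.length := length_Lstate l K i
  unfold solveStep
  have hslice : PySem.List.slice (Lstate l K i) (some (i : Int)) (some ((i : Int) + K))
      = ((Lstate l K i).drop i).take K.toNat := by
    rw [PySem.List.slice_toNat _ (by positivity) (by omega)]
    simp only [Int.toNat_natCast]
    congr 1
    omega
  rw [hslice]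
  have hset : ∀ r, pySetSlice (Lstate l K i) (i : Int) ((i : Int) + K) r
      = (Lstate l K i).take i ++ r ++ (Lstate l K i).drop (min (i + K.toNat) l.length) := by
    intro r
    unfold pySetSlice
    have h1 : PySem.List.clampIdx (Lstate l K i).length (i : Int) = i := by
      rw [PySem.List.clampIdx_natCast, hlen]; omega
    have h2 : PySem.List.clampIdx (Lstate l K i).length ((i : Int) + K)
        = min (i + K.toNat) l.length := by
      rw [show ((i : Int) + K) = ((i + K.toNat : Nat) : Int) by push_cast; omega,
        PySem.List.clampIdx_natCast, hlen]
    rw [h1, h2, show max (min (i + K.toNat) l.length) i = min (i + K.toNat) l.length by omega]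
  rcases Nat.eq_zero_or_pos K.toNat with hk0 | hkpos
  · -- K = 0: empty window, state unchanged
    have hKz : K = 0 := by omega
    rw [hk0, List.take_zero, solveInner_nil, hset,
      show min (i + K.toNat) l.length = i by omega,
      show (Lstate l K i).take i ++ ([] : List Char) ++ (Lstate l K i).drop i = Lstate l K i by simp]
    unfold Lstate
    apply List.map_congr_left
    intro p hp
    rw [reachedB_succ]
    by_cases hip : i < p
    · have hnp : ¬ ((p : Int) < (i : Int) + K) := by rw [hKz]; push_cast; omega
      simp [hnp]
    · simp [hip]
  · -- K ≥ 1: window of length ≥ 1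
    have hiL : i < (Lstate l K i).length := by omega
    have hdropi : (Lstate l K i).drop i = (Lstate l K i)[i] :: (Lstate l K i).drop (i + 1) :=
      List.drop_eq_getElem_cons hiL
    set cval := if holds l K i then '#' else l.getD i ' ' with hcval
    have hXi : (Lstate l K i)[i]'hiL = cval := by
      simp only [Lstate, List.getElem_map, List.getElem_range]
      rw [reachedB_of_le l K (le_refl i), hcval]
    set w := min (i + K.toNat) l.length with hw
    have hw1 : i + 1 ≤ w := by omega
    have hwn : w ≤ l.length := by omega
    set t : List Char := ((Lstate l K i).drop (i + 1)).take (K.toNat - 1) with ht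
    have htlen : t.length = w - i - 1 := by
      rw [ht]; simp [hlen]; omega
    have hsub : ((Lstate l K i).drop i).take K.toNat = cval :: t := by
      obtain ⟨m, hm⟩ : ∃ m, K.toNat = m + 1 := ⟨K.toNat - 1, by omega⟩
      rw [hdropi, hXi, hm, List.take_succ_cons, ht, hm]
      norm_num
    rw [hsub, solveInner_cons, hset]
    have htget : ∀ j', j' < t.length →
        t.getD j' ' ' = if reachedB l K i (i + 1 + j') then '#' else l.getD (i + 1 + j') ' ' := by
      intro j' hj'
      have hj'2 : j' < (((Lstate l K i).drop (i + 1)).take (K.toNat - 1)).length := by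
        rw [← ht]; exact hj'
      rw [ht, List.getD_eq_getElem _ ' ' hj'2, List.getElem_take, List.getElem_drop]
      simp only [Lstate, List.getElem_map, List.getElem_range]
    have hA : (Lstate l K i).take i = (Lstate l K (i + 1)).take i := by
      unfold Lstate
      rw [← List.map_take, ← List.map_take, List.take_range]
      apply List.map_congr_left
      intro p hp
      have hpi : p < i := by have := List.mem_range.mp hp; omega
      rw [reachedB_succ]
      have hip : ¬ i < p := by omega
      simp [hip]
    have hC : (Lstate l K i).drop w = (Lstate l K (i + 1)).drop w := by
      apply List.ext_getElem (by simp [length_Lstate])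
      intro j h1 h2
      have hwj : w + j < l.length := by
        have hlen' : (List.drop w (Lstate l K i)).length = l.length - w := by
          simp [length_Lstate]
        rw [hlen'] at h1
        omega
      rw [List.getElem_drop, List.getElem_drop]
      simp only [Lstate, List.getElem_map, List.getElem_range]
      rw [reachedB_succ]
      have hnpK : ¬ ((w : Int) + (j : Int) < (i : Int) + K) := by
        have hh : i + K.toNat <= w + j := by omega
        omega
      simp [hnpK]
    have hB : cval :: t.map (fun x => if x == cval then '#' else x)
        = ((Lstate l K (i + 1)).drop i).take (w - i) := by
      apply List.ext_getElem
      · simp only [List.length_cons, List.length_map, List.length_take, List.length_drop,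
          length_Lstate, htlen]
        omega
      intro j h1 h2
      cases j with
      | zero =>
        rw [List.getElem_cons_zero, List.getElem_take, List.getElem_drop]
        simp only [Lstate, List.getElem_map, List.getElem_range, Nat.add_zero]
        rw [reachedB_succ, reachedB_of_le l K (le_refl i), hcval]
        simp
      | succ j' =>
        have hj't : j' < t.length := by
          simp only [List.length_cons, List.length_map] at h1; omega
        rw [List.getElem_cons_succ, List.getElem_map,
          ← List.getD_eq_getElem t ' ' hj't, htget j' hj't,
          List.getElem_take, List.getElem_drop]
        simp only [Lstate, List.getElem_map, List.getElem_range]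
        have hidx : i + (j' + 1) = i + 1 + j' := by omega
        rw [hidx]
        have hip : i < i + 1 + j' := by omega
        have hpw : i + 1 + j' < w := by omega
        have hpK : ((i + 1 + j' : Nat) : Int) < (i : Int) + K := by
          have hh : i + 1 + j' < i + K.toNat := by omega
          push_cast; omega
        rw [reachedB_succ]
        by_cases hr : reachedB l K i (i + 1 + j') = true
        · simp [hr]
        · have hrf : reachedB l K i (i + 1 + j') = false := by simpa using hr
          have h1' : (l.getD (i + 1 + j') ' ' == '#') = false :=
            reachedB_false_first l K i _ hrf
          by_cases hh : holds l K i = true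
          · have hcv : cval = '#' := by rw [hcval, if_pos hh]
            have h2' : (l.getD (i + 1 + j') ' ' == cval) = false := by rw [hcv]; exact h1'
            have h2n : ¬ (l[(i + 1 + j')]?.getD ' ' = cval) := by
              rw [← List.getD_eq_getElem?_getD]; simpa using h2'
            simp [hrf, hh, h2n]
          · have hhf : holds l K i = false := by simpa using hh
            have hcv : cval = l.getD i ' ' := by rw [hcval, if_neg (by simp [hhf])]
            have hpK2 : (i : Int) + 1 + (j' : Int) < (i : Int) + K := by push_cast at hpK; omega
            by_cases heq : l.getD i ' ' = l.getD (i + 1 + j') ' '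
            · have h2' : (l.getD (i + 1 + j') ' ' == cval) = true := by rw [hcv, heq]; simp
              have h2n : l[(i + 1 + j')]?.getD ' ' = cval := by
                rw [← List.getD_eq_getElem?_getD]; simpa using h2'
              have heqn : l[i]?.getD ' ' = l[(i + 1 + j')]?.getD ' ' := by
                rw [← List.getD_eq_getElem?_getD, ← List.getD_eq_getElem?_getD]; exact heq
              simp [hrf, hhf, h2n, heqn, hip, hpK2]
            · have h2' : (l.getD (i + 1 + j') ' ' == cval) = false := by
                rw [hcv]; exact beq_eq_false_iff_ne.mpr (fun h => heq h.symm)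
              have h2n : ¬ (l[(i + 1 + j')]?.getD ' ' = cval) := by
                rw [← List.getD_eq_getElem?_getD]; simpa using h2'
              have heqn : ¬ (l[i]?.getD ' ' = l[(i + 1 + j')]?.getD ' ') := by
                rw [← List.getD_eq_getElem?_getD, ← List.getD_eq_getElem?_getD]; exact heq
              simp [hrf, hhf, h2n, heqn]
    rw [hA, hB, hC, List.append_assoc]
    have hdw : (Lstate l K (i + 1)).drop w = ((Lstate l K (i + 1)).drop i).drop (w - i) := by
      rw [List.drop_drop]; congr 1; omega
    rw [hdw, List.take_append_drop, List.take_append_drop]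

lemma outerA (l : List Char) (K : Int) (hK : 0 ≤ K) :
    ∀ i, i ≤ l.length →
      (PySem.List.pyRange 0 (i : Int) 1).foldl (solveStep K) l = Lstate l K i := by
  intro i
  induction i with
  | zero =>
    intro _
    rw [show ((0 : Nat) : Int) = 0 by simp, PySem.List.pyRange_one_eq_nil le_rfl,
      List.foldl_nil, Lstate_zero]
  | succ i ih =>
    intro hi
    rw [show (((i + 1 : Nat)) : Int) = ((i : Nat) : Int) + 1 by push_cast; ring,
      PySem.List.pyRange_one_succ_right (by positivity), List.foldl_append,
      ih (by omega), List.foldl_cons, List.foldl_nil, stepA_eq l K hK i (by omega)]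

lemma countA (l : List Char) (K : Int) :
    PySem.List.count (Lstate l K l.length) '#' = (List.range l.length).countP (holds l K) := by
  rw [show PySem.List.count (Lstate l K l.length) '#' = List.count '#' (Lstate l K l.length) from rfl,
    List.count_eq_countP, Lstate, List.countP_map]
  apply List.countP_congr
  intro p hp
  have hpn : p < l.length := List.mem_range.mp hp
  simp only [Function.comp]
  rw [reachedB_of_le l K (le_of_lt hpn)]
  by_cases hh : holds l K p = true
  · rw [if_pos hh, hh]; simp
  · have hhf : holds l K p = false := by simpa using hh
    have h1 := holds_false_first l K p hhf
    rw [if_neg (by simp [hhf]), h1, hhf]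

lemma solve_eq (S : String) (K : Int) (hK : 0 ≤ K) :
    solve S K = ((List.range S.toList.length).countP (holds S.toList K) : Int) := by
  rw [show solve S K = (PySem.List.count ((PySem.List.pyRange 0 (S.toList.length : Int) 1).foldl
      (solveStep K) S.toList) '#' : Int) from rfl,
    outerA S.toList K hK S.toList.length le_rfl, countA]

-- B side: `lastS l K p c` = what B's dict stores for key c after scanning positions 0..p-1
def lastS (l : List Char) (K : Int) (p : Nat) (c : Char) : Option Int :=
  (List.range p).foldl
    (fun acc j => if (l.getD j ' ' == c) && !holds l K j then some (j : Int) else acc) none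

lemma lastS_succ (l : List Char) (K : Int) (p : Nat) (c : Char) :
    lastS l K (p + 1) c =
      if (l.getD p ' ' == c) && !holds l K p then some (p : Int) else lastS l K p c := by
  simp [lastS, List.range_succ]

lemma lastS_spec_some (l : List Char) (K : Int) (p : Nat) (c : Char) (q : Int)
    (h : lastS l K p c = some q) :
    ∃ m : Nat, q = (m : Int) ∧ m < p ∧ l.getD m ' ' = c ∧ holds l K m = false := by
  induction p with
  | zero => simp [lastS] at h
  | succ r ih =>
    rw [lastS_succ] at h
    by_cases hcond : ((l.getD r ' ' == c) && !holds l K r) = true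
    · rw [if_pos hcond] at h
      simp only [Bool.and_eq_true] at hcond
      obtain ⟨h1, h2⟩ := hcond
      exact ⟨r, (Option.some.inj h).symm, by omega, by simpa using h1, by simpa using h2⟩
    · rw [if_neg hcond] at h
      obtain ⟨m, hm1, hm2, hm3⟩ := ih h
      exact ⟨m, hm1, by omega, hm3⟩

lemma lastS_max (l : List Char) (K : Int) (p : Nat) (c : Char) (j : Nat) (hj : j < p)
    (hc : l.getD j ' ' = c) (hh : holds l K j = false) :
    ∃ q : Int, lastS l K p c = some q ∧ (j : Int) ≤ q := by
  induction p with
  | zero => omega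
  | succ r ih =>
    rw [lastS_succ]
    rcases Nat.lt_or_ge j r with hjr | hjr
    · by_cases hcond : ((l.getD r ' ' == c) && !holds l K r) = true
      · exact ⟨(r : Int), by rw [if_pos hcond], by exact_mod_cast Nat.le_of_lt hjr⟩
      · obtain ⟨q, hq, hjq⟩ := ih hjr
        exact ⟨q, by rw [if_neg hcond, hq], hjq⟩
    · have hjr' : j = r := by omega
      subst hjr'
      have hcond : ((l.getD j ' ' == c) && !holds l K j) = true := by rw [hc, hh]; simp
      exact ⟨(j : Int), by rw [if_pos hcond], le_refl _⟩

lemma holds_iff_window (l : List Char) (K : Int) (p : Nat) (hc : l.getD p ' ' ≠ '#') :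
    holds l K p = true ↔
      ∃ q, lastS l K p (l.getD p ' ') = some q ∧ (p : Int) < q + K := by
  constructor
  · intro h
    rcases (holds_iff l K p).mp h with h1 | ⟨j, hjp, hK', hhj, hcj⟩
    · exact absurd h1 hc
    · obtain ⟨q, hq, hjq⟩ := lastS_max l K p (l.getD p ' ') j hjp hcj hhj
      exact ⟨q, hq, by omega⟩
  · rintro ⟨q, hq, hqK⟩
    obtain ⟨m, hqm, hmp, hmc, hmh⟩ := lastS_spec_some l K p (l.getD p ' ') q hq
    subst hqm
    exact (holds_iff l K p).mpr (Or.inr ⟨m, hmp, by omega, hmh, hmc⟩)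

lemma B_aux (l : List Char) (K : Int) :
    ∀ (m p : Nat), p + m = l.length → ∀ (cnt : Int) (d : PySem.Dict Char Int),
      (∀ c, d.get? c = lastS l K p c) →
      cnt = ((List.range p).countP (holds l K) : Int) →
      ((PySem.List.enumerate (l.drop p) (p : Int)).foldl (solveAltStep K) (cnt, d)).1
        = ((List.range l.length).countP (holds l K) : Int) := by
  intro m
  induction m with
  | zero =>
    intro p hp cnt d hd hcnt
    have hpl : p = l.length := by omega
    subst hpl
    rw [List.drop_length]
    simpa using hcnt
  | succ m ih =>
    intro p hp cnt d hd hcnt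
    have hpl : p < l.length := by omega
    rw [List.drop_eq_getElem_cons hpl, PySem.List.enumerate_cons, List.foldl_cons]
    have hgd : l.getD p ' ' = l[p] := List.getD_eq_getElem l ' ' hpl
    by_cases hc : l[p] = '#'
    · have hhp : holds l K p = true := (holds_iff l K p).mpr (Or.inl (by rw [hgd, hc]))
      have hstep1 : solveAltStep K (cnt, d) ((p : Int), l[p]) = (cnt + 1, d) := by
        unfold solveAltStep; simp [hc]
      rw [hstep1, show (p : Int) + 1 = ((p + 1 : Nat) : Int) by push_cast; ring]
      apply ih (p + 1) (by omega)
      · intro c'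
        rw [lastS_succ, hd c']
        simp [hhp]
      · rw [List.range_succ, List.countP_append, hcnt]
        simp [hhp]
    · have hcb : (l[p] == '#') = false := by simp [hc]
      have hcd : l.getD p ' ' ≠ '#' := by rw [hgd]; exact hc
      rcases hlc : lastS l K p (l[p]) with _ | q
      · -- no surviving earlier occurrence: p stays, becomes the new dict entry
        have hhp : holds l K p = false := by
          by_contra hT
          have hT' : holds l K p = true := by simpa using hT
          obtain ⟨q, hq, _⟩ := (holds_iff_window l K p hcd).mp hT'
          rw [hgd, hlc] at hq
          simp at hq
        have hstep1 : solveAltStep K (cnt, d) ((p : Int), l[p]) = (cnt, d.insert l[p] (p : Int)) := by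
          unfold solveAltStep; simp [hcb, hd, hlc]
        rw [hstep1, show (p : Int) + 1 = ((p + 1 : Nat) : Int) by push_cast; ring]
        apply ih (p + 1) (by omega)
        · intro c'
          by_cases hcc : c' = l[p]
          · subst hcc
            rw [PySem.Dict.get?_insert_self, lastS_succ, if_pos (by rw [hgd, hhp]; simp)]
          · have hbn : ¬ (l[p]?.getD ' ' = c') := by
              rw [← List.getD_eq_getElem?_getD, hgd]; exact fun h => hcc h.symm
            rw [PySem.Dict.get?_insert_of_ne d _ hcc, lastS_succ, if_neg (by simp [hbn]), hd c']
        · rw [List.range_succ, List.countP_append, hcnt]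
          simp [hhp]
      · by_cases hqK : (p : Int) < q + K
        · have hhp : holds l K p = true :=
            (holds_iff_window l K p hcd).mpr ⟨q, by rw [hgd]; exact hlc, hqK⟩
          have hstep1 : solveAltStep K (cnt, d) ((p : Int), l[p]) = (cnt + 1, d) := by
            unfold solveAltStep; simp [hcb, hd, hlc, hqK]
          rw [hstep1, show (p : Int) + 1 = ((p + 1 : Nat) : Int) by push_cast; ring]
          apply ih (p + 1) (by omega)
          · intro c'
            rw [lastS_succ, hd c']
            simp [hhp]
          · rw [List.range_succ, List.countP_append, hcnt]
            simp [hhp]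
        · have hhp : holds l K p = false := by
            by_contra hT
            have hT' : holds l K p = true := by simpa using hT
            obtain ⟨q', hq', hq'K⟩ := (holds_iff_window l K p hcd).mp hT'
            rw [hgd, hlc] at hq'
            have hqq : q = q' := Option.some.inj hq'
            omega
          have hstep1 : solveAltStep K (cnt, d) ((p : Int), l[p]) = (cnt, d.insert l[p] (p : Int)) := by
            unfold solveAltStep; simp [hcb, hd, hlc, hqK]
          rw [hstep1, show (p : Int) + 1 = ((p + 1 : Nat) : Int) by push_cast; ring]
          apply ih (p + 1) (by omega)
          · intro c'
            by_cases hcc : c' = l[p]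
            · subst hcc
              rw [PySem.Dict.get?_insert_self, lastS_succ, if_pos (by rw [hgd, hhp]; simp)]
            · have hbn : ¬ (l[p]?.getD ' ' = c') := by
                rw [← List.getD_eq_getElem?_getD, hgd]; exact fun h => hcc h.symm
              rw [PySem.Dict.get?_insert_of_ne d _ hcc, lastS_succ, if_neg (by simp [hbn]), hd c']
          · rw [List.range_succ, List.countP_append, hcnt]
            simp [hhp]

lemma solve_alt_eq (S : String) (K : Int) :
    solve_alt S K = ((List.range S.toList.length).countP (holds S.toList K) : Int) := by
  have h := B_aux S.toList K S.toList.length 0 (by omega) 0 PySem.Dict.empty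
    (fun c => rfl) (by simp)
  simpa using h

-- ===== VERDICT (by name: the statement is the Claim_ definition above) =====
theorem solve_spec : Claim_equal_solve := by
  intro S K _ hK
  unfold Spec_solve
  rw [solve_eq S K hK, solve_alt_eq]
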